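-- pv_equiv track=rewrite | github.com/Steci/Legacy-Project | src/sosa/calculator.py | _expand_branch
-- ===== SOURCE A (Python) =====
-- from typing import Deque, Dict, List, Mapping, Optional, Tuple
--
-- def _expand_branch(number: int) -> List[int]:
--     """Return branch directions for ``number`` (0 for father, 1 for mother)."""
--
--     directions: List[int] = []
--     current = number
--     while current > 1:
--         directions.append(0 if current % 2 == 0 else 1)
--         current //= 2
--     directions.reverse()
--     return directions
-- ===== SOURCE B (Python) =====
-- from typing import List
--
-- def _expand_branch(number: int) -> List[int]:
--     """Return branch directions for ``number`` (0 for father, 1 for mother)."""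
--     if number <= 1:
--         return []
--     return [int(c) for c in bin(number)[3:]]
-- ===== Notes on version B (the rewrite author's own statement) =====
-- stated objective: idiomatic
-- what changed: Replaces the repeated-division loop that appends LSB-first and then reverses with a single MSB-first pass over bin(number)'s digits after the leading '0b1' prefix.
import Mathlib
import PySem

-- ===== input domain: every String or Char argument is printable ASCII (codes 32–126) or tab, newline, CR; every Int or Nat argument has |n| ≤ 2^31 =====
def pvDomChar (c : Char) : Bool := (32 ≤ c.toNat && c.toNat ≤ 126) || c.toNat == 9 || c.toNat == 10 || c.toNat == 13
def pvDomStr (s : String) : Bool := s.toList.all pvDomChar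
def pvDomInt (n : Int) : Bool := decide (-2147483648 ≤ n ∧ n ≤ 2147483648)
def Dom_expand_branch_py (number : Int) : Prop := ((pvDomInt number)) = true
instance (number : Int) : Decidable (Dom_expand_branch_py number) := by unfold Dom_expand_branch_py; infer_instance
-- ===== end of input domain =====

-- B re-reads the binary string representation MSB-first instead of A's divide-append-reverse loop; same values, idiomatic.

-- ===== PORT A =====
-- while current > 1: directions.append(0 if current % 2 == 0 else 1); current //= 2
def expandLoopA (current : Int) (directions : List Int) : List Int :=
  if h : current > 1 then
    expandLoopA (PySem.Int.floordiv current 2)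
      (directions ++ [if PySem.Int.mod current 2 = 0 then 0 else 1])
  else directions
termination_by current.toNat
decreasing_by
  have h2 : PySem.Int.floordiv current 2 = current / 2 :=
    PySem.Int.floordiv_eq_ediv_of_pos (by omega)
  rw [h2]; omega

def expand_branch_py (number : Int) : List Int :=
  (expandLoopA number []).reverse

-- ===== PORT B =====
-- bin(n) for n > 0 yields "0b" followed by these digit chars (MSB first)
def binDigits (n : Int) : List Char :=
  if _h : n ≥ 1 then
    binDigits (n / 2) ++ [if n % 2 = 0 then '0' else '1']
  else []
termination_by n.toNat
decreasing_by omega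

-- int(c) for a binary digit char; exact since bin(number)[3:] contains only '0'/'1'
def digitToInt (c : Char) : Int := if c = '1' then 1 else 0

def expand_branch_py_alt (number : Int) : List Int :=
  if number ≤ 1 then []
  else ((binDigits number).drop 1).map digitToInt

-- ===== PRECONDITION & SPEC =====
def Spec_expand_branch_py (number : Int) (out : List Int) : Prop := out = expand_branch_py_alt number
instance (number : Int) (out : List Int) : Decidable (Spec_expand_branch_py number out) := by unfold Spec_expand_branch_py; infer_instance

-- ===== CLAIM (what is proved, stated in full; the proofs are below) =====
def Claim_equal_expand_branch_py : Prop := ∀ (number : Int), Dom_expand_branch_py number → Spec_expand_branch_py number (expand_branch_py number)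

-- ===== LEMMAS AND PROOFS =====

theorem expandLoopA_append_fuel : ∀ (k : Nat) (n : Int), n.toNat ≤ k →
    ∀ acc, expandLoopA n acc = acc ++ expandLoopA n [] := by
  intro k
  induction k with
  | zero =>
    intro n hn acc
    rw [expandLoopA, dif_neg (by omega), expandLoopA, dif_neg (by omega)]
    simp
  | succ k ih =>
    intro n hn acc
    by_cases h : n > 1
    · have hfd : PySem.Int.floordiv n 2 = n / 2 :=
        PySem.Int.floordiv_eq_ediv_of_pos (by omega)
      have hk : (n / 2).toNat ≤ k := by omega
      rw [expandLoopA, dif_pos h]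
      conv_rhs => rw [expandLoopA, dif_pos h]
      rw [hfd, ih (n / 2) hk, ih (n / 2) hk ([] ++ [if PySem.Int.mod n 2 = 0 then 0 else 1])]
      simp
    · rw [expandLoopA, dif_neg h, expandLoopA, dif_neg h]; simp

theorem expandLoopA_append (n : Int) (acc : List Int) :
    expandLoopA n acc = acc ++ expandLoopA n [] :=
  expandLoopA_append_fuel n.toNat n (le_refl _) acc

theorem binDigits_ne_nil (n : Int) (h : n ≥ 1) : binDigits n ≠ [] := by
  rw [binDigits, dif_pos h]; simp

theorem main_lemma_fuel : ∀ (k : Nat) (n : Int), n.toNat ≤ k → n > 1 →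
    (expandLoopA n []).reverse = ((binDigits n).drop 1).map digitToInt := by
  intro k
  induction k with
  | zero => intro n hn h; omega
  | succ k ih =>
    intro n hn h
    have hfd : PySem.Int.floordiv n 2 = n / 2 :=
      PySem.Int.floordiv_eq_ediv_of_pos (by omega)
    have hmd : PySem.Int.mod n 2 = n % 2 :=
      PySem.Int.mod_eq_emod_of_pos (by omega)
    rw [expandLoopA, dif_pos h, expandLoopA_append]
    rw [binDigits, dif_pos (by omega : n ≥ 1)]
    have hhalf : n / 2 ≥ 1 := by omega
    rw [List.drop_append_of_le_length (by
      have := binDigits_ne_nil (n / 2) hhalf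
      cases hb : binDigits (n / 2) with
      | nil => exact absurd hb this
      | cons a l => simp)]
    by_cases h2 : n / 2 > 1
    · rw [List.reverse_append, hfd, ih (n / 2) (by omega) h2, hmd]
      simp [digitToInt]
      rcases Int.emod_two_eq n with he | he <;> simp [he]
    · have hne : n / 2 = 1 := by omega
      rw [hfd, hne, expandLoopA, dif_neg (by omega)]
      have h0 : binDigits 0 = [] := by rw [binDigits]; simp
      have h1 : binDigits 1 = ['1'] := by
        rw [binDigits, dif_pos (by norm_num : (1:Int) ≥ 1)]
        norm_num [h0]
      rw [hmd, h1]
      simp [digitToInt]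
      rcases Int.emod_two_eq n with he | he <;> simp [he]

-- ===== VERDICT (by name: the statement is the Claim_ definition above) =====
theorem expand_branch_py_spec : Claim_equal_expand_branch_py := by
  intro n _
  unfold Spec_expand_branch_py expand_branch_py expand_branch_py_alt
  by_cases h : n ≤ 1
  · rw [expandLoopA, dif_neg (by omega), if_pos h]; rfl
  · rw [if_neg h]
    exact main_lemma_fuel n.toNat n (le_refl _) (by omega)
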